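-- pv_equiv track=rewrite | github.com/DvaKompota/leetcode_and_interviews | Algorithms/GoogleInterview.py | replace_vars_in_string
-- ===== SOURCE A (Python) =====
-- def replace_vars_in_string(input_string: str, vars_dict: dict) -> str:
-- 	"""
-- 	Write a tool which supports substitutions of string by string variables.
--
-- 	Example 1:
-- 	“X” -> “123”
-- 	“Y” -> “456”
--
-- 	“%X%_%Y%” should be resolved to “123_456”
--
-- 	Example 2:
--
-- 	USER = "foo"
-- 	TMP = "tmp"
-- 	HOME = "home123"
--
-- 	Example Input : /user/%USER%/home/%TMP%
-- 	Example Output : /user/foo/home/tmp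
-- 	"""
-- 	left = 0
-- 	is_open = False
-- 	output_string = ""
-- 	for i, letter in enumerate(input_string):
-- 		if letter == "%" and not is_open:
-- 			left = i + 1
-- 			is_open = True
-- 		elif letter == "%" and is_open:
-- 			var_name = input_string[left:i]
-- 			left = 0
-- 			is_open = False
-- 			output_string += vars_dict[var_name]
-- 		elif not is_open:
-- 			output_string += letter
-- 	return output_string
-- ===== SOURCE B (Python) =====
-- def replace_vars_in_string(input_string: str, vars_dict: dict) -> str:
--     i = input_string.find('%')
--     if i == -1:
--         return input_string
--     head, rest = input_string[:i], input_string[i + 1:]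
--     j = rest.find('%')
--     if j == -1:
--         return head
--     return head + vars_dict[rest[:j]] + replace_vars_in_string(rest[j + 1:], vars_dict)
-- ===== Notes on version B (the rewrite author's own statement) =====
-- stated objective: alternative
-- what changed: Replaced A's per-character state machine (is_open/left flags, character-by-character output appends) with a recursive find-and-rewrite pass: locate the next '%...%' pair with str.find, substitute it, and recurse on the remaining tail.
-- outside the precondition, e.g. on replace_vars_in_string('%X%', {}): A raises KeyError, B raises KeyError
import Mathlib
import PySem

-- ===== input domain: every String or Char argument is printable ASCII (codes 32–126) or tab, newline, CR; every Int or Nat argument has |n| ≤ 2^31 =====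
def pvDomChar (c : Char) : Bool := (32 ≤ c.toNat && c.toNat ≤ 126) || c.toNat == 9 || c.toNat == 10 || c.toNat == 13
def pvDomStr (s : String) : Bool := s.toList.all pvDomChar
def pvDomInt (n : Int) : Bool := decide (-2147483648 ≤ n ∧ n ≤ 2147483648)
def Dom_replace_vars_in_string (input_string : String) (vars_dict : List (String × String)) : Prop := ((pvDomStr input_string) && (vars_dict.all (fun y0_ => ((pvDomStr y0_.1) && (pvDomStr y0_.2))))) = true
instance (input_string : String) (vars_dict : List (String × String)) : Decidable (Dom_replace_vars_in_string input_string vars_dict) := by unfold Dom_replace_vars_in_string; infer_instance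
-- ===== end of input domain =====

-- B replaces A's per-character open/close state machine with a recursive find-and-rewrite
-- pass (locate the next '%…%' pair, substitute, recurse on the tail); alternative structure, same cost.


-- ===== PORT A =====
-- loop body of A: state (left, is_open, output); vars_dict[name] is ported with get?;
-- the `.getD ""` default is never reached on Pre_ (Python raises KeyError exactly there)
def pvStepA (cs : List Char) (vars_dict : List (String × String))
    (st : Int × Bool × List Char) (ic : Int × Char) : Int × Bool × List Char :=
  if ic.2 = '%' ∧ st.2.1 = false then (ic.1 + 1, true, st.2.2)
  else if ic.2 = '%' ∧ st.2.1 = true then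
    (0, false, st.2.2 ++
      (((PySem.Dict.mk vars_dict).get?
          (String.mk (PySem.List.slice cs (some st.1) (some ic.1)))).getD "").toList)
  else if st.2.1 = false then (st.1, st.2.1, st.2.2 ++ [ic.2])
  else st

def replace_vars_in_string (input_string : String) (vars_dict : List (String × String)) : String :=
  String.mk
    (((PySem.List.enumerate input_string.toList).foldl
        (pvStepA input_string.toList vars_dict) (0, false, [])).2.2)

-- ===== PORT B =====
-- B on the character list: find the opening '%', then the closing '%' in the rest,
-- substitute the name between them and recurse on what follows
def pvAltGo (vars_dict : List (String × String)) (cs : List Char) : List Char :=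
  let i := PySem.Chars.find cs ['%']
  if i = -1 then cs
  else
    let head := PySem.List.slice cs none (some i)
    let rest := PySem.List.slice cs (some (i + 1)) none
    let j := PySem.Chars.find rest ['%']
    if j = -1 then head
    else
      head ++
        (((PySem.Dict.mk vars_dict).get?
            (String.mk (PySem.List.slice rest none (some j)))).getD "").toList ++
        pvAltGo vars_dict (PySem.List.slice rest (some (j + 1)) none)
termination_by cs.length
decreasing_by
  have h0 : (0 : Int) ≤ i := by
    have := PySem.Chars.neg_one_le_find cs ['%']
    omega
  have hne : cs ≠ [] := by
    have hin : ['%'] <:+: cs := (PySem.Chars.find_ne_neg_one_iff cs ['%']).mp (by simpa [i] using ‹¬ i = -1›)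
    rcases hin with ⟨p, q, hpq⟩
    intro hnil; rw [hnil] at hpq; simp at hpq
  have hrest : rest = cs.drop (i + 1).toNat := PySem.List.slice_from cs (by omega)
  have hdec : rest.length < cs.length := by
    rw [hrest, List.length_drop]
    have : 1 ≤ (i + 1).toNat := by omega
    have : 0 < cs.length := List.length_pos_iff.mpr hne
    omega
  have hj0 : (0 : Int) ≤ j := by
    have := PySem.Chars.neg_one_le_find rest ['%']
    omega
  calc (PySem.List.slice rest (some (j + 1)) none).length
      = (rest.drop (j + 1).toNat).length := by rw [PySem.List.slice_from rest (by omega)]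
    _ ≤ rest.length := by simp
    _ < cs.length := hdec

def replace_vars_in_string_alt (input_string : String) (vars_dict : List (String × String)) : String :=
  String.mk (pvAltGo vars_dict input_string.toList)

-- ===== PRECONDITION & SPEC =====
-- Pre_ excludes exactly the inputs on which Python A raises KeyError: some closed
-- %name% token of the string is not a key of vars_dict (B raises KeyError there too).
def Pre_replace_vars_in_string (input_string : String) (vars_dict : List (String × String)) : Prop :=
  (let parts := input_string.toList.splitOn '%'
   (List.range (parts.length - 1)).all
     (fun i => i % 2 == 0 ||
       ((PySem.Dict.mk vars_dict).get? (String.mk (parts.getD i []))).isSome)) = true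
instance (input_string : String) (vars_dict : List (String × String)) : Decidable (Pre_replace_vars_in_string input_string vars_dict) := by unfold Pre_replace_vars_in_string; infer_instance

def pvWitness_replace_vars_in_string : String × (List (String × String)) :=
  ("/user/%USER%/home/%TMP%", [("USER", "foo"), ("TMP", "tmp")])

def Spec_replace_vars_in_string (input_string : String) (vars_dict : List (String × String)) (out : String) : Prop := out = replace_vars_in_string_alt input_string vars_dict
instance (input_string : String) (vars_dict : List (String × String)) (out : String) : Decidable (Spec_replace_vars_in_string input_string vars_dict out) := by unfold Spec_replace_vars_in_string; infer_instance

-- ===== CLAIM (what is proved, stated in full; the proofs are below) =====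
def Claim_equal_replace_vars_in_string : Prop := ∀ (input_string : String) (vars_dict : List (String × String)), Dom_replace_vars_in_string input_string vars_dict → Pre_replace_vars_in_string input_string vars_dict → Spec_replace_vars_in_string input_string vars_dict (replace_vars_in_string input_string vars_dict)

-- ===== LEMMAS AND PROOFS =====

-- first-occurrence decomposition of a list containing '%'
lemma pv_first_pct {l : List Char} (h : '%' ∈ l) :
    ∃ m1 m2, l = m1 ++ '%' :: m2 ∧ '%' ∉ m1 := by
  induction l with
  | nil => cases h
  | cons c t ih =>
    by_cases hc : c = '%'
    · exact ⟨[], t, by simp [hc], by simp⟩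
    · have ht : '%' ∈ t := by
        cases h with
        | head => exact absurd rfl hc
        | tail _ h => exact h
      obtain ⟨m1, m2, rfl, hm1⟩ := ih ht
      refine ⟨c :: m1, m2, rfl, ?_⟩
      simp [hm1]
      exact fun h => hc h.symm

-- find '%' on a decomposed list points at the first '%'
lemma pv_find_decomp (m1 m2 : List Char) (h : '%' ∉ m1) :
    PySem.Chars.find (m1 ++ '%' :: m2) ['%'] = (m1.length : Int) := by
  set l := m1 ++ '%' :: m2 with hl
  have hmem : '%' ∈ l := by simp [hl]
  have hnn : 0 ≤ PySem.Chars.find l ['%'] := by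
    have h1 := PySem.Chars.neg_one_le_find l ['%']
    have h2 : PySem.Chars.find l ['%'] ≠ -1 :=
      (PySem.Chars.find_ne_neg_one_iff l ['%']).mpr
        ((List.singleton_infix_iff '%' l).mpr hmem)
    omega
  obtain ⟨hpre, hmin⟩ := PySem.Chars.find_spec hnn
  have hat : ['%'] <+: l.drop m1.length := by
    rw [hl, List.drop_left]
    exact ⟨m2, rfl⟩
  have hle : (PySem.Chars.find l ['%']).toNat ≤ m1.length := by
    by_contra hgt
    exact (hmin m1.length (by omega)) hat
  have hge : ¬ (PySem.Chars.find l ['%']).toNat < m1.length := by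
    intro hlt
    rcases hpre with ⟨t, ht⟩
    have hsome : l[(PySem.Chars.find l ['%']).toNat]? = some '%' := by
      have h2 := congrArg List.head? ht
      simpa [List.head?_drop] using h2.symm
    rw [hl, List.getElem?_append_left (by omega)] at hsome
    exact h (List.mem_of_getElem? hsome)
  omega

-- scanning a '%'-free chunk with is_open = false copies it to the output
lemma pv_scan_closed (cs : List Char) (d : List (String × String)) (m : List Char)
    (hm : '%' ∉ m) :
    ∀ (k L : Int) (out : List Char),
      (PySem.List.enumerate m k).foldl (pvStepA cs d) (L, false, out) = (L, false, out ++ m) := by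
  induction m with
  | nil => intro k L out; simp [PySem.List.enumerate]
  | cons c t ih =>
    intro k L out
    have hc : c ≠ '%' := fun h => hm (h ▸ List.mem_cons_self)
    have ht : '%' ∉ t := fun h => hm (List.mem_cons_of_mem _ h)
    rw [PySem.List.enumerate_cons, List.foldl_cons]
    have hstep : pvStepA cs d (L, false, out) (k, c) = (L, false, out ++ [c]) := by
      simp [pvStepA, hc]
    rw [hstep, ih ht]
    simp

-- scanning a '%'-free chunk with is_open = true changes nothing
lemma pv_scan_open (cs : List Char) (d : List (String × String)) (m : List Char)
    (hm : '%' ∉ m) :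
    ∀ (k L : Int) (out : List Char),
      (PySem.List.enumerate m k).foldl (pvStepA cs d) (L, true, out) = (L, true, out) := by
  induction m with
  | nil => intro k L out; simp [PySem.List.enumerate]
  | cons c t ih =>
    intro k L out
    have hc : c ≠ '%' := fun h => hm (h ▸ List.mem_cons_self)
    have ht : '%' ∉ t := fun h => hm (List.mem_cons_of_mem _ h)
    rw [PySem.List.enumerate_cons, List.foldl_cons]
    have hstep : pvStepA cs d (L, true, out) (k, c) = (L, true, out) := by
      simp [pvStepA, hc]
    rw [hstep, ih ht]

-- main loop invariant: from a closed state, A's remaining fold appends pvAltGo of the suffix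
lemma pv_main (cs : List Char) (d : List (String × String)) :
    ∀ n (r : List Char) (k : Nat) (L : Int) (out : List Char),
      r.length ≤ n → cs.drop k = r →
      (((PySem.List.enumerate r (k : Int)).foldl (pvStepA cs d) (L, false, out)).2.2
        = out ++ pvAltGo d r) := by
  intro n
  induction n with
  | zero =>
    intro r k L out hn _
    have : r = [] := List.eq_nil_of_length_eq_zero (by omega)
    subst this
    rw [pvAltGo]
    simp [PySem.List.enumerate, show PySem.Chars.find [] ['%'] = -1 from by decide]
  | succ n ih =>
    intro r k L out hn hdrop
    by_cases hmem : '%' ∈ r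
    · obtain ⟨m1, m2, rfl, hm1⟩ := pv_first_pct hmem
      have hi : PySem.Chars.find (m1 ++ '%' :: m2) ['%'] = (m1.length : Int) :=
        pv_find_decomp m1 m2 hm1
      have hine : (m1.length : Int) ≠ -1 := by omega
      -- A side: scan m1 closed, open at the first '%'
      rw [show m1 ++ '%' :: m2 = m1 ++ ['%'] ++ m2 by simp] at *
      rw [PySem.List.enumerate_append, PySem.List.enumerate_append, List.foldl_append,
        List.foldl_append, pv_scan_closed cs d m1 hm1]
      have hopen : List.foldl (pvStepA cs d)
          (L, false, out ++ m1) (PySem.List.enumerate ['%'] ((k : Int) + m1.length))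
          = ((k : Int) + m1.length + 1, true, out ++ m1) := by
        simp [PySem.List.enumerate, pvStepA]
      rw [hopen]
      by_cases hmem2 : '%' ∈ m2
      · obtain ⟨m, rest, rfl, hm⟩ := pv_first_pct hmem2
        have hj : PySem.Chars.find (m ++ '%' :: rest) ['%'] = (m.length : Int) :=
          pv_find_decomp m rest hm
        have hjne : (m.length : Int) ≠ -1 := by omega
        rw [show m ++ '%' :: rest = m ++ ['%'] ++ rest by simp] at *
        rw [PySem.List.enumerate_append, PySem.List.enumerate_append, List.foldl_append,
          List.foldl_append, pv_scan_open cs d m hm]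
        have hclose : List.foldl (pvStepA cs d) ((k : Int) + m1.length + 1, true, out ++ m1)
            (PySem.List.enumerate ['%'] ((k : Int) + (m1 ++ ['%']).length + m.length))
            = (0, false, out ++ m1 ++
                (((PySem.Dict.mk d).get?
                    (String.mk (PySem.List.slice cs (some ((k : Int) + m1.length + 1))
                      (some ((k : Int) + (m1 ++ ['%']).length + m.length))))).getD "").toList) := by
          simp [PySem.List.enumerate, pvStepA]
        rw [hclose]
        -- the looked-up name is m
        have hslice : PySem.List.slice cs (some ((k : Int) + m1.length + 1))
            (some ((k : Int) + (m1 ++ ['%']).length + m.length)) = m := by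
          have e1 : ((k : Int) + m1.length + 1) = ((k + m1.length + 1 : Nat) : Int) := by
            push_cast; ring
          have e2 : ((k : Int) + (m1 ++ ['%']).length + m.length)
              = ((k + m1.length + 1 + m.length : Nat) : Int) := by
            simp; ring
          rw [e1, e2, PySem.List.slice_natCast]
          have hdropc : cs.drop (k + m1.length + 1) = m ++ ['%'] ++ rest := by
            have : cs.drop (k + m1.length + 1) = ((m1 ++ ['%'] ++ (m ++ ['%'] ++ rest)).drop (m1.length + 1)) := by
              rw [← hdrop, List.drop_drop]; ring_nf
            rw [this, show m1 ++ ['%'] ++ (m ++ ['%'] ++ rest) = (m1 ++ ['%']) ++ (m ++ ['%'] ++ rest) by simp,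
              List.drop_left' (by simp)]
          rw [hdropc]
          simp [List.take_left']
        rw [hslice]
        -- recurse on rest
        have harg : ((k : Int) + ((m1 ++ ['%']).length : Int) + ((m ++ ['%']).length : Int))
            = ((k + m1.length + m.length + 2 : Nat) : Int) := by
          simp; ring
        have hdropr : cs.drop (k + m1.length + m.length + 2) = rest := by
          have h2 : cs.drop (k + m1.length + m.length + 2)
              = (m1 ++ ['%'] ++ (m ++ ['%'] ++ rest)).drop (m1.length + m.length + 2) := by
            rw [← hdrop]
            conv_rhs => rw [List.drop_drop]
            congr 1
            omega
          rw [h2, show m1 ++ ['%'] ++ (m ++ ['%'] ++ rest) = (m1 ++ ['%'] ++ m ++ ['%']) ++ rest by simp,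
            List.drop_left' (by simp; omega)]
        have hrec := ih rest (k + m1.length + m.length + 2) 0
          (out ++ m1 ++ (((PySem.Dict.mk d).get? (String.mk m)).getD "").toList)
          (by simp at hn; omega) hdropr
        rw [harg, hrec]
        -- B side
        conv_rhs => rw [pvAltGo]
        simp only [hi, if_neg hine]
        have hhead : PySem.List.slice (m1 ++ ['%'] ++ (m ++ ['%'] ++ rest)) none (some (m1.length : Int)) = m1 := by
          rw [PySem.List.slice_to_natCast, show m1 ++ ['%'] ++ (m ++ ['%'] ++ rest) = m1 ++ (['%'] ++ (m ++ ['%'] ++ rest)) by simp,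
            List.take_left]
        have hrest : PySem.List.slice (m1 ++ ['%'] ++ (m ++ ['%'] ++ rest)) (some ((m1.length : Int) + 1)) none
            = m ++ ['%'] ++ rest := by
          have e : ((m1.length : Int) + 1) = ((m1.length + 1 : Nat) : Int) := by push_cast; ring
          rw [e, PySem.List.slice_from_natCast,
            show m1 ++ ['%'] ++ (m ++ ['%'] ++ rest) = (m1 ++ ['%']) ++ (m ++ ['%'] ++ rest) by simp,
            List.drop_left' (by simp)]
        rw [hhead, hrest, hj, if_neg hjne]
        have hname : PySem.List.slice (m ++ ['%'] ++ rest) none (some (m.length : Int)) = m := by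
          rw [PySem.List.slice_to_natCast, show m ++ ['%'] ++ rest = m ++ (['%'] ++ rest) by simp, List.take_left]
        have htail : PySem.List.slice (m ++ ['%'] ++ rest) (some ((m.length : Int) + 1)) none = rest := by
          have e : ((m.length : Int) + 1) = ((m.length + 1 : Nat) : Int) := by push_cast; ring
          rw [e, PySem.List.slice_from_natCast, List.drop_left' (by simp)]
        rw [hname, htail]
        simp
      · -- the second '%' is never found: A stays open and drops m2, B returns head
        rw [pv_scan_open cs d m2 hmem2]
        conv_rhs => rw [pvAltGo]
        simp only [hi, if_neg hine]
        have hhead : PySem.List.slice (m1 ++ ['%'] ++ m2) none (some (m1.length : Int)) = m1 := by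
          rw [PySem.List.slice_to_natCast, show m1 ++ ['%'] ++ m2 = m1 ++ (['%'] ++ m2) by simp, List.take_left]
        have hrest : PySem.List.slice (m1 ++ ['%'] ++ m2) (some ((m1.length : Int) + 1)) none = m2 := by
          have e : ((m1.length : Int) + 1) = ((m1.length + 1 : Nat) : Int) := by push_cast; ring
          rw [e, PySem.List.slice_from_natCast, List.drop_left' (by simp)]
        have hj : PySem.Chars.find m2 ['%'] = -1 := by
          rw [PySem.Chars.find_eq_neg_one_iff]
          rw [List.singleton_infix_iff]
          exact hmem2
        rw [hhead, hrest, hj]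
        simp
    · -- no '%' at all: A copies r, B returns it unchanged
      rw [pv_scan_closed cs d r hmem]
      have hf : PySem.Chars.find r ['%'] = -1 := by
        rw [PySem.Chars.find_eq_neg_one_iff, List.singleton_infix_iff]
        exact hmem
      rw [pvAltGo]
      simp [hf]

theorem pv_AB (s : String) (d : List (String × String)) :
    replace_vars_in_string s d = replace_vars_in_string_alt s d := by
  unfold replace_vars_in_string replace_vars_in_string_alt
  have := pv_main s.toList d s.toList.length s.toList 0 0 [] le_rfl rfl
  simp only [Nat.cast_zero] at this
  rw [this]
  simp

-- ===== VERDICT (by name: the statement is the Claim_ definition above) =====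
theorem replace_vars_in_string_spec : Claim_equal_replace_vars_in_string := by
  intro s d _ _
  unfold Spec_replace_vars_in_string
  exact pv_AB s d
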